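-- pv_equiv track=rewrite | github.com/yammouch/python_lesson | 2050_schem/util.py | parse_cell
-- ===== SOURCE A (Python) =====
-- def parse_cell(cell):
--   a = []
--   try:
--     n = int(cell, 16)
--   except ValueError:
--     return [0] * 6
--   for _ in range(6):
--     a.append(n % 2)
--     n = n // 2
--   return a
-- ===== SOURCE B (Python) =====
-- def parse_cell(cell):
--   try:
--     n = int(cell, 16)
--   except ValueError:
--     return [0] * 6
--   s = format(n & 0x3f, '06b')
--   return [int(c) for c in reversed(s)]
-- ===== Notes on version B (the rewrite author's own statement) =====
-- stated objective: idiomatic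
-- what changed: Replaces the six-step mod/floordiv accumulator loop by a single mask (n & 0x3f) formatted as a fixed-width binary string whose characters, read in reverse, are the LSB-first bits.
import Mathlib
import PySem

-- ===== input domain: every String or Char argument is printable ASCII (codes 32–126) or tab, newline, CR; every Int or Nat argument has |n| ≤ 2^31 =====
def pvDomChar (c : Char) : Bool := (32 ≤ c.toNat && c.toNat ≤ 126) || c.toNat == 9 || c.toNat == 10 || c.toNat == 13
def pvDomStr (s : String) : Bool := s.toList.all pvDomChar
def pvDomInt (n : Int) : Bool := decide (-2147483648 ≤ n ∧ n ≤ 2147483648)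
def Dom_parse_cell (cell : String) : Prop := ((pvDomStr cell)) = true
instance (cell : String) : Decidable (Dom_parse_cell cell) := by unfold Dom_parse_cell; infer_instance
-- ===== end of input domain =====

-- B replaces A's mod/div loop by masking the low 6 bits and reading a fixed-width binary
-- string in reverse (idiomatic formatting instead of manual base conversion).

-- ===== PORT A =====
def parse_cell (cell : String) : List Int :=
  match PySem.Int.ofStrBase? cell 16 with
  | none => List.replicate 6 0
  | some n =>
    ((PySem.List.pyRange 0 6 1).foldl
      (fun (st : List Int × Int) _ =>
        (st.1 ++ [PySem.Int.mod st.2 2], PySem.Int.floordiv st.2 2))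
      ([], n)).1

-- ===== PORT B =====
-- 'n & 0x3f' on Python ints (two's-complement, positive mask) is exactly n mod 64.
-- 'format(m, "06b")' for 0 ≤ m < 64 writes bit (5-k) at position k: six chars, MSB first.
def parse_cell_alt (cell : String) : List Int :=
  match PySem.Int.ofStrBase? cell 16 with
  | none => List.replicate 6 0
  | some n =>
    let m := PySem.Int.mod n 64
    let s : List Char := (List.range 6).reverse.map
      (fun k => if PySem.Int.mod (PySem.Int.floordiv m (2 ^ k)) 2 = 1 then '1' else '0')
    s.reverse.map (fun c => if c = '1' then (1 : Int) else 0)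

-- ===== PRECONDITION & SPEC =====
def Spec_parse_cell (cell : String) (out : List Int) : Prop := out = parse_cell_alt cell
instance (cell : String) (out : List Int) : Decidable (Spec_parse_cell cell out) := by unfold Spec_parse_cell; infer_instance

-- ===== CLAIM (what is proved, stated in full; the proofs are below) =====
def Claim_equal_parse_cell : Prop := ∀ (cell : String), Dom_parse_cell cell → Spec_parse_cell cell (parse_cell cell)

-- ===== LEMMAS AND PROOFS =====

theorem parse_cell_body (n : Int) :
    ((PySem.List.pyRange 0 6 1).foldl
      (fun (st : List Int × Int) _ =>
        (st.1 ++ [PySem.Int.mod st.2 2], PySem.Int.floordiv st.2 2))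
      ([], n)).1
    =
    (let m := PySem.Int.mod n 64
     let s : List Char := (List.range 6).reverse.map
       (fun k => if PySem.Int.mod (PySem.Int.floordiv m (2 ^ k)) 2 = 1 then '1' else '0')
     s.reverse.map (fun c => if c = '1' then (1 : Int) else 0)) := by
  have hr : PySem.List.pyRange 0 6 1 = [0, 1, 2, 3, 4, 5] := by decide
  rw [hr]
  simp only [PySem.Int.mod, PySem.Int.floordiv, List.foldl, List.range_succ, List.range_zero,
    List.nil_append, List.cons_append, List.reverse_cons, List.reverse_nil, List.map_cons,
    List.map_nil]
  norm_num [Int.fmod_eq_emod, Int.fdiv_eq_ediv]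
  refine ⟨?_, ?_, ?_, ?_, ?_, ?_⟩ <;> split_ifs with h <;> simp at h <;> omega

-- ===== VERDICT (by name: the statement is the Claim_ definition above) =====
theorem parse_cell_spec : Claim_equal_parse_cell := by
  intro cell _
  unfold Spec_parse_cell parse_cell parse_cell_alt
  cases PySem.Int.ofStrBase? cell 16 with
  | none => rfl
  | some n => exact parse_cell_body n
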